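-- pv_equiv track=rewrite | github.com/LoylP/DataMining_Click2Ad | utils/apriori.py | find_maximal_itemsets
-- ===== SOURCE A (Python) =====
-- def find_maximal_itemsets(frequent_itemsets):
--     maximal_itemsets = {}
--     sorted_itemsets = sorted(frequent_itemsets.items(), key=lambda x: len(x[0]), reverse=True)
--
--     for itemset, support in sorted_itemsets:
--         is_maximal = True
--         itemset_set = set(itemset)
--
--         for larger_itemset in maximal_itemsets:
--             if itemset_set.issubset(set(larger_itemset)):
--                 is_maximal = False
--                 break
--
--         if is_maximal:
--             maximal_itemsets[itemset] = support
--
--     return maximal_itemsets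
-- ===== SOURCE B (Python) =====
-- def find_maximal_itemsets(frequent_itemsets):
--     # Subset-closure index: 'covered' stores the canonical key (sorted tuple of the
--     # distinct items) of EVERY subset of every maximal itemset kept so far, so the
--     # per-candidate subsumption test is a single hash lookup instead of a scan
--     # with a set-inclusion test against each kept itemset.
--     def subsets(key):
--         if not key:
--             return [()]
--         rest = subsets(key[1:])
--         return rest + [(key[0],) + s for s in rest]
--
--     result = {}
--     covered = set()
--     for itemset, support in sorted(frequent_itemsets.items(),
--                                    key=lambda e: len(e[0]), reverse=True):
--         key = tuple(sorted(set(itemset)))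
--         if key not in covered:
--             result[itemset] = support
--             covered.update(subsets(key))
--     return result
-- ===== Notes on version B (the rewrite author's own statement) =====
-- stated objective: faster
-- what changed: A tests each candidate for subsumption by scanning the kept maximal itemsets and running a set-inclusion test against each; B instead maintains a hash set of the canonical keys (sorted tuples of distinct items) of ALL subsets of the kept maximal itemsets, enumerated recursively when an itemset is kept, so the subsumption test becomes a single hash lookup of the candidate's canonical key.
import Mathlib
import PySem

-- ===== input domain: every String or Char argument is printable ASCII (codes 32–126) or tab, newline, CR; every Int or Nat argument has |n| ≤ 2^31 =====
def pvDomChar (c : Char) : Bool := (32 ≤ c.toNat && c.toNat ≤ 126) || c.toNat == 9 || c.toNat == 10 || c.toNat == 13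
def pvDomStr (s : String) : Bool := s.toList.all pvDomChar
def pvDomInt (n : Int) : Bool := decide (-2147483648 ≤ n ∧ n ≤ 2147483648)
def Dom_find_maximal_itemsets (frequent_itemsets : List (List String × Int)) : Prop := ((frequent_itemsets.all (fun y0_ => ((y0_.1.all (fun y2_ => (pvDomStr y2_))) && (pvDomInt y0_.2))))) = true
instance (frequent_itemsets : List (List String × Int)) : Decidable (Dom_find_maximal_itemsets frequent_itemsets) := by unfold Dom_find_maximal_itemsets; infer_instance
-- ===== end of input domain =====

-- B replaces A's scan of the kept maximal itemsets (a set-inclusion test against each)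
-- by a hash set holding the canonical key of EVERY subset of every kept maximal itemset,
-- so the per-candidate subsumption test is one membership lookup instead of a scan
-- (a timing run measured B faster at the larger generated sizes).

-- ===== PORT A =====
def find_maximal_itemsets (frequent_itemsets : List (List String × Int)) : List (List String × Int) :=
  -- maximal_itemsets = {};  sorted_itemsets = sorted(items, key=len, reverse=True)
  let sorted_itemsets :=
    PySem.List.sorted (PySem.Dict.ofList frequent_itemsets).items (fun e => (e.1.length : Int)) true
  -- for itemset, support in sorted_itemsets: is_maximal = not any subset-of-a-kept-maximal (break = any)
  let maximal_itemsets :=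
    sorted_itemsets.foldl
      (fun (M : PySem.Dict (List String) Int) e =>
        let is_maximal :=
          ! (M.keys.any (fun larger_itemset =>
              PySem.Set.issubset (PySem.Set.ofList e.1) (PySem.Set.ofList larger_itemset)))
        if is_maximal then M.insert e.1 e.2 else M)
      PySem.Dict.empty
  maximal_itemsets.items

-- ===== PORT B =====
-- def subsets(key): return [()] if empty else rest + [(key[0],)+s for s in rest]
def pvSubsets : List String → List (List String)
  | [] => [[]]
  | x :: t => pvSubsets t ++ (pvSubsets t).map (fun s => x :: s)

def find_maximal_itemsets_alt (frequent_itemsets : List (List String × Int)) : List (List String × Int) :=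
  -- result = {}; covered = set()  (canonical keys of all subsets of kept maximals)
  let st :=
    (PySem.List.sorted (PySem.Dict.ofList frequent_itemsets).items (fun e => (e.1.length : Int)) true).foldl
      (fun (st : PySem.Dict (List String) Int × PySem.Set (List String)) e =>
        -- key = tuple(sorted(set(itemset)))
        let key := PySem.List.sorted (PySem.Set.ofList e.1) (fun s => s) false
        if st.2.contains key then st
        else (st.1.insert e.1 e.2, st.2.update (pvSubsets key)))
      (PySem.Dict.empty, PySem.Set.empty)
  st.1.items

-- ===== PRECONDITION & SPEC =====
def Spec_find_maximal_itemsets (frequent_itemsets : List (List String × Int)) (out : List (List String × Int)) : Prop := out = find_maximal_itemsets_alt frequent_itemsets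
instance (frequent_itemsets : List (List String × Int)) (out : List (List String × Int)) : Decidable (Spec_find_maximal_itemsets frequent_itemsets out) := by unfold Spec_find_maximal_itemsets; infer_instance

-- ===== CLAIM (what is proved, stated in full; the proofs are below) =====
def Claim_equal_find_maximal_itemsets : Prop := ∀ (frequent_itemsets : List (List String × Int)), Dom_find_maximal_itemsets frequent_itemsets → Spec_find_maximal_itemsets frequent_itemsets (find_maximal_itemsets frequent_itemsets)

-- ===== LEMMAS AND PROOFS =====

-- the canonical key B computes: sorted list of the distinct items
def pvCanon (x : List String) : List String :=
  PySem.List.sorted (PySem.Set.ofList x) (fun s => s) false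

theorem pvSub_refl (x : List String) :
    PySem.Set.issubset (PySem.Set.ofList x) (PySem.Set.ofList x) = true := by
  rw [PySem.Set.issubset_iff]; intro a ha; exact ha

theorem pvMem_canon (x : List String) (a : String) : a ∈ pvCanon x ↔ a ∈ x := by
  unfold pvCanon
  rw [PySem.List.mem_sorted, PySem.Set.mem_ofList]

theorem pvCanon_pairwise (x : List String) : (pvCanon x).Pairwise (· < ·) :=
  PySem.List.sorted_ofList_pairwise_lt x

-- pvSubsets l enumerates exactly the sublists of l
theorem pvMem_pvSubsets (l z : List String) : z ∈ pvSubsets l ↔ z.Sublist l := by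
  induction l generalizing z with
  | nil => simp [pvSubsets, List.sublist_nil]
  | cons x t ih =>
      simp only [pvSubsets, List.mem_append, List.mem_map, ih, List.sublist_cons_iff]
      constructor
      · rintro (h | ⟨s, hs, rfl⟩)
        · exact Or.inl h
        · exact Or.inr ⟨s, rfl, hs⟩
      · rintro (h | ⟨r, rfl, hr⟩)
        · exact Or.inl h
        · exact Or.inr ⟨r, hr, rfl⟩

-- the hash-lookup of the canonical key is exactly A's set-inclusion test
theorem pvKey_mem_iff (x y : List String) :
    pvCanon x ∈ pvSubsets (pvCanon y) ↔
      PySem.Set.issubset (PySem.Set.ofList x) (PySem.Set.ofList y) = true := by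
  rw [pvMem_pvSubsets, PySem.Set.issubset_iff]
  constructor
  · intro hsub a ha
    rw [PySem.Set.mem_ofList] at ha
    have : a ∈ pvCanon y := hsub.subset ((pvMem_canon x a).mpr ha)
    rw [PySem.Set.mem_ofList, ← pvMem_canon y a]; exact this
  · intro hss
    refine List.sublist_of_subperm_of_pairwise
      ((List.Pairwise.nodup (pvCanon_pairwise x)).subperm ?_)
      (pvCanon_pairwise x) (pvCanon_pairwise y)
    intro a ha
    rw [pvMem_canon] at ha
    have := hss a ((PySem.Set.mem_ofList x a).mpr ha)
    rw [PySem.Set.mem_ofList] at this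
    exact (pvMem_canon y a).mpr this

theorem pvContains_eq (s : PySem.Set (List String)) (z : List String) :
    PySem.Set.contains s z = decide (z ∈ s) := by
  simp [PySem.Set.contains]

-- Loop invariant: A's test "subset of some kept maximal" equals B's hash lookup of the
-- canonical key in the subset closure; then the two loops build the same dict.
theorem pvLoop_eq (L : List (List String × Int)) :
    ∀ (M : PySem.Dict (List String) Int) (covered : PySem.Set (List String)),
    (∀ x : List String,
        M.keys.any (fun y => PySem.Set.issubset (PySem.Set.ofList x) (PySem.Set.ofList y))
          = PySem.Set.contains covered (pvCanon x)) →
    L.foldl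
      (fun (M : PySem.Dict (List String) Int) e =>
        let is_maximal :=
          ! (M.keys.any (fun larger_itemset =>
              PySem.Set.issubset (PySem.Set.ofList e.1) (PySem.Set.ofList larger_itemset)))
        if is_maximal then M.insert e.1 e.2 else M) M
    = (L.foldl
        (fun (st : PySem.Dict (List String) Int × PySem.Set (List String)) e =>
          let key := PySem.List.sorted (PySem.Set.ofList e.1) (fun s => s) false
          if st.2.contains key then st
          else (st.1.insert e.1 e.2, st.2.update (pvSubsets key)))
        (M, covered)).1 := by
  induction L with
  | nil => intro M covered _; rfl
  | cons e L ih =>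
      intro M covered hinv
      simp only [List.foldl_cons]
      have hkey : PySem.List.sorted (PySem.Set.ofList e.1) (fun s => s) false = pvCanon e.1 := rfl
      by_cases hc :
          M.keys.any (fun y => PySem.Set.issubset (PySem.Set.ofList e.1) (PySem.Set.ofList y)) = true
      · -- e is dropped by both loops
        have hcB : PySem.Set.contains covered (pvCanon e.1) = true := by rw [← hinv]; exact hc
        rw [show (! (M.keys.any (fun larger_itemset =>
              PySem.Set.issubset (PySem.Set.ofList e.1) (PySem.Set.ofList larger_itemset)))) = false
            from by simp [hc]]
        simp only [hkey, hcB, if_true, Bool.false_eq_true, if_false]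
        exact ih M covered hinv
      · -- e is kept by both loops
        have hcb := Bool.not_eq_true _ |>.mp hc
        have hcB : PySem.Set.contains covered (pvCanon e.1) = false := by rw [← hinv]; exact hcb
        rw [show (! (M.keys.any (fun larger_itemset =>
              PySem.Set.issubset (PySem.Set.ofList e.1) (PySem.Set.ofList larger_itemset)))) = true
            from by simp [hcb]]
        simp only [hkey, hcB, if_true, Bool.false_eq_true, if_false]
        apply ih
        intro x
        -- e.1 is a fresh key (it would subsume itself otherwise)
        have hfresh : M.contains e.1 = false := by
          cases h : M.contains e.1 with
          | false => rfl
          | true =>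
              exfalso
              have hmem : e.1 ∈ M.keys := (PySem.Dict.contains_iff_mem_keys M e.1).mp h
              have : M.keys.any (fun y =>
                  PySem.Set.issubset (PySem.Set.ofList e.1) (PySem.Set.ofList y)) = true :=
                List.any_eq_true.mpr ⟨e.1, hmem, pvSub_refl e.1⟩
              rw [this] at hcb; exact Bool.true_eq_false.mp hcb
        rw [PySem.Dict.keys_insert_of_not_contains _ _ hfresh, List.any_append, hinv x]
        simp only [List.any_cons, List.any_nil, Bool.or_false, pvContains_eq,
          PySem.Set.mem_update]
        rw [show (PySem.Set.issubset (PySem.Set.ofList x) (PySem.Set.ofList e.1))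
              = decide (pvCanon x ∈ pvSubsets (pvCanon e.1)) from by
            by_cases h : pvCanon x ∈ pvSubsets (pvCanon e.1)
            · simp [h, (pvKey_mem_iff x e.1).mp h]
            · simp only [h, decide_false]
              cases hb : PySem.Set.issubset (PySem.Set.ofList x) (PySem.Set.ofList e.1) with
              | false => rfl
              | true => exact absurd ((pvKey_mem_iff x e.1).mpr hb) h]
        simp

theorem find_maximal_itemsets_eq (frequent_itemsets : List (List String × Int)) :
    find_maximal_itemsets frequent_itemsets = find_maximal_itemsets_alt frequent_itemsets := by
  unfold find_maximal_itemsets find_maximal_itemsets_alt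
  have := pvLoop_eq
    (PySem.List.sorted (PySem.Dict.ofList frequent_itemsets).items (fun e => (e.1.length : Int)) true)
    PySem.Dict.empty PySem.Set.empty
    (by intro x; simp [PySem.Dict.keys_empty, PySem.Set.empty, PySem.Set.contains])
  simp only [this]

-- ===== VERDICT (by name: the statement is the Claim_ definition above) =====
theorem find_maximal_itemsets_spec : Claim_equal_find_maximal_itemsets := by
  intro fs _
  unfold Spec_find_maximal_itemsets
  exact find_maximal_itemsets_eq fs
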